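-- pv_equiv track=rewrite | github.com/wadmp/wadmp.github.io | python_scripts/bulk_configure/get_apps.py | sort_columns
-- ===== SOURCE A (Python) =====
-- def sort_columns(old_list):
--     """Re-order a list of strings.
--     Specifically, we want to keep all the Firmware apps together, before the User Modules.
--
--     The first 6 positions are fixed. For example:
--          0   Alias                       Alias
--          1   Serial No                   Serial No
--          2   Order Code                  Order Code
--          3   MAC                         MAC
--          4   IMEI                        IMEI
--          5   Type                        Type
--          6   FW ICR-321x, 6.2.5          FW ICR-321x, 6.2.5
--          7   wadmp_client, 2.0.5         FW ICR-321x, 6.2.3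
--          8   ipsec_tools, 1.0.1          wadmp_client, 2.0.5
--          9   zebra, 1.7.0                ipsec_tools, 1.0.1
--          10  bgp, 1.7.0                  zebra, 1.7.0
--          11  nhrp, 1.1.0                 bgp, 1.7.0
--          12  netflow, 1.0.0              nhrp, 1.1.0
--          13  scepClient, 2.0.0           netflow, 1.0.0
--          14  FW ICR-321x, 6.2.3          scepClient, 2.0.0
--          15  pinger, 2.3.3               pinger, 2.3.3
--
--     """
--     order = []
--     first_fw_found = None
--
--     for i, name in enumerate(old_list):
--         if name.startswith("FW "):
--             if not first_fw_found:
--                 first_fw_found = True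
--                 fw_index = i
--                 order.append(i)
--             else:
--                 order.insert(fw_index + 1, i)
--                 fw_index += 1
--         else:
--             order.append(i)
--
--     new_list = [old_list[i] for i in order]
--
--     return new_list
-- ===== SOURCE B (Python) =====
-- def sort_columns(old_list):
--     """Single pass: partition into (items before first FW), (FW items), (non-FW items after first FW)."""
--     pre, fws, post = [], [], []
--     seen_fw = False
--     for name in old_list:
--         if name.startswith("FW "):
--             seen_fw = True
--             fws.append(name)
--         elif seen_fw:
--             post.append(name)
--         else:
--             pre.append(name)
--     return pre + fws + post
-- ===== Notes on version B (the rewrite author's own statement) =====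
-- stated objective: simpler
-- what changed: Replaced the index-order list built with repeated list.insert plus a final index-gather comprehension by a single pass that partitions the strings themselves into pre-FW, FW and post-FW segments and concatenates them.
import Mathlib
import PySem

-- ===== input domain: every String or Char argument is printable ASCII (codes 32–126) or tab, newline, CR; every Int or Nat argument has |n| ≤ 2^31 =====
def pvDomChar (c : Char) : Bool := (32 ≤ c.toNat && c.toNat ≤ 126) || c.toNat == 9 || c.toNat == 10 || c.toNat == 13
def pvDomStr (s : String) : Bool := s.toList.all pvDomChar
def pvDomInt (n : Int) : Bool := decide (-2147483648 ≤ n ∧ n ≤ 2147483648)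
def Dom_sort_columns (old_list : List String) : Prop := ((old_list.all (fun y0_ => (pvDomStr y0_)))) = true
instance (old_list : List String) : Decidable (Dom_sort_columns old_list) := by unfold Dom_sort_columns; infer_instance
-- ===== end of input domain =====

-- B replaces A's index list built with repeated list.insert by a single partitioning pass over the strings (simpler).

-- ===== PORT A =====
-- A's loop over enumerate(old_list): state = (order, first_fw_found, fw_index).
-- fw_index starts undefined in Python (only read after first_fw_found); ported with initial value 0.
def sortColsStepA (st : List Int × Bool × Int) (p : Int × String) : List Int × Bool × Int :=
  let (order, found, fwi) := st
  if PySem.Str.startswith p.2 "FW " then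
    if !found then (order ++ [p.1], true, p.1)
    else (PySem.List.insert order (fwi + 1) p.1, found, fwi + 1)
  else (order ++ [p.1], found, fwi)

def sort_columns (old_list : List String) : List String :=
  let st := (PySem.List.enumerate old_list 0).foldl sortColsStepA ([], false, 0)
  -- new_list = [old_list[i] for i in order]; every i in order is in range, so the default is never used
  st.1.map (fun i => PySem.List.pyGetD old_list i "")

-- ===== PORT B =====
-- B's loop over the strings: state = (pre, fws, post, seen_fw).
def sortColsStepB (st : List String × List String × List String × Bool) (name : String) :
    List String × List String × List String × Bool :=
  let (pre, fws, post, seen) := st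
  if PySem.Str.startswith name "FW " then (pre, fws ++ [name], post, true)
  else if seen then (pre, fws, post ++ [name], seen)
  else (pre ++ [name], fws, post, seen)

def sort_columns_alt (old_list : List String) : List String :=
  let st := old_list.foldl sortColsStepB ([], [], [], false)
  st.1 ++ st.2.1 ++ st.2.2.1

-- ===== PRECONDITION & SPEC =====
def Spec_sort_columns (old_list : List String) (out : List String) : Prop := out = sort_columns_alt old_list
instance (old_list : List String) (out : List String) : Decidable (Spec_sort_columns old_list out) := by unfold Spec_sort_columns; infer_instance

-- ===== CLAIM (what is proved, stated in full; the proofs are below) =====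
def Claim_equal_sort_columns : Prop := ∀ (old_list : List String), Dom_sort_columns old_list → Spec_sort_columns old_list (sort_columns old_list)

-- ===== LEMMAS AND PROOFS =====

-- the loop invariant relating A's state (after processing a prefix of length k) to B's state
def sortColsInv (xs : List String) (k : Nat) (sA : List Int × Bool × Int)
    (sB : List String × List String × List String × Bool) : Prop :=
  sA.1.map (fun i => PySem.List.pyGetD xs i "") = sB.1 ++ sB.2.1 ++ sB.2.2.1 ∧
  sA.2.1 = sB.2.2.2 ∧
  (sA.2.1 = false → sB.2.1 = [] ∧ sB.2.2.1 = [] ∧ sB.1.length = k) ∧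
  (sA.2.1 = true → sA.2.2 = (sB.1.length : Int) + sB.2.1.length - 1) ∧
  sB.1.length + sB.2.1.length + sB.2.2.1.length = k

lemma map_pyInsert (xs : List Int) (i : Int) (v : Int) (f : Int → String) :
    (PySem.List.insert xs i v).map f = PySem.List.insert (xs.map f) i (f v) := by
  simp [PySem.List.insert]

lemma insert_at_boundary (pre fws post : List String) (s : String) :
    PySem.List.insert (pre ++ fws ++ post) ((pre.length : Int) + fws.length) s
      = pre ++ (fws ++ [s]) ++ post := by
  have h : ((pre.length : Int) + fws.length) = (((pre ++ fws).length : Nat) : Int) := by simp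
  rw [h, PySem.List.insert_natCast _ _ _ (by simp), ← List.append_assoc,
    List.take_left, List.drop_left]
  simp

lemma sortCols_loop (front rest : List String) (sA : List Int × Bool × Int)
    (sB : List String × List String × List String × Bool)
    (hinv : sortColsInv (front ++ rest) front.length sA sB) :
    sortColsInv (front ++ rest) (front ++ rest).length
      ((PySem.List.enumerate rest (front.length : Int)).foldl sortColsStepA sA)
      (rest.foldl sortColsStepB sB) := by
  induction rest generalizing front sA sB with
  | nil => simpa using hinv
  | cons x r ih =>
    rw [PySem.List.enumerate_cons, List.foldl_cons, List.foldl_cons]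
    have hfr : front ++ x :: r = (front ++ [x]) ++ r := by simp
    have hlen : (front ++ [x]).length = front.length + 1 := by simp
    have hget : PySem.List.pyGetD (front ++ x :: r) (front.length : Int) "" = x := by
      rw [PySem.List.pyGetD_natCast (front ++ x :: r) front.length ""]
      simp [List.getD]
    obtain ⟨sA1, found, fwi⟩ := sA
    obtain ⟨pre, fws, post, seen⟩ := sB
    obtain ⟨h1, h2, h3, h4, h5⟩ := hinv
    simp only at h1 h2 h3 h4 h5
    have step : sortColsInv (front ++ x :: r) (front ++ [x]).length
        (sortColsStepA (sA1, found, fwi) ((front.length : Int), x))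
        (sortColsStepB (pre, fws, post, seen) x) := by
      by_cases hfw : PySem.Str.startswith x "FW " = true
      · have hfwc : PySem.Chars.startswith x.toList ['F', 'W', ' '] = true := by
          simpa using hfw
        cases hfound : found with
        | false =>
          obtain ⟨hfe, hpe, hpl⟩ := h3 hfound
          subst hfe hpe
          have hseen : seen = false := by rw [← h2]; exact hfound
          have hA : sortColsStepA (sA1, false, fwi) ((front.length : Int), x)
              = (sA1 ++ [(front.length : Int)], true, (front.length : Int)) := by
            simp [sortColsStepA, hfwc]
          have hB : sortColsStepB (pre, [], [], seen) x = (pre, [x], [], true) := by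
            simp [sortColsStepB, hfwc]
          rw [hA, hB]
          refine ⟨by simp [h1, hget], rfl, by simp, ?_, by simp [hpl]⟩
          intro _
          simp only [List.length_singleton]
          rw [hpl]
          push_cast
          ring
        | true =>
          have hseen : seen = true := by rw [← h2]; exact hfound
          have h4' := h4 hfound
          have hA : sortColsStepA (sA1, true, fwi) ((front.length : Int), x)
              = (PySem.List.insert sA1 (fwi + 1) (front.length : Int), true, fwi + 1) := by
            simp [sortColsStepA, hfwc]
          have hB : sortColsStepB (pre, fws, post, seen) x = (pre, fws ++ [x], post, true) := by
            simp [sortColsStepB, hfwc]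
          rw [hA, hB]
          have hidx : fwi + 1 = (pre.length : Int) + fws.length := by rw [h4']; ring
          refine ⟨?_, rfl, by simp, ?_, by simp; omega⟩
          · simp only [map_pyInsert, hget, h1]
            rw [hidx, insert_at_boundary]
          · intro _
            rw [hidx]
            simp only [List.length_append, List.length_singleton]
            push_cast
            ring
      · rw [Bool.not_eq_true] at hfw
        have hfwc : PySem.Chars.startswith x.toList ['F', 'W', ' '] = false := by
          simpa using hfw
        cases hseen : seen with
        | false =>
          have hfound : found = false := by rw [h2, hseen]
          obtain ⟨hfe, hpe, hpl⟩ := h3 hfound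
          subst hfe hpe
          subst hfound
          have hA : sortColsStepA (sA1, false, fwi) ((front.length : Int), x)
              = (sA1 ++ [(front.length : Int)], false, fwi) := by
            simp [sortColsStepA, hfwc]
          have hB : sortColsStepB (pre, [], [], false) x = (pre ++ [x], [], [], false) := by
            simp [sortColsStepB, hfwc]
          rw [hA, hB]
          exact ⟨by simp [h1, hget], rfl, fun _ => ⟨rfl, rfl, by simp [hpl]⟩, by simp, by simp [hpl]⟩
        | true =>
          have hfound : found = true := by rw [h2, hseen]
          have h4' := h4 hfound
          subst hfound
          have hA : sortColsStepA (sA1, true, fwi) ((front.length : Int), x)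
              = (sA1 ++ [(front.length : Int)], true, fwi) := by
            simp [sortColsStepA, hfwc]
          have hB : sortColsStepB (pre, fws, post, true) x = (pre, fws, post ++ [x], true) := by
            simp [sortColsStepB, hfwc]
          rw [hA, hB]
          exact ⟨by simp [h1, hget], rfl, by simp, fun _ => h4', by simp; omega⟩
    have := ih (front ++ [x]) _ _ (hfr ▸ step)
    rw [hfr]
    simpa [hlen] using this

-- ===== VERDICT (by name: the statement is the Claim_ definition above) =====
theorem sort_columns_spec : Claim_equal_sort_columns := by
  intro old_list _
  unfold Spec_sort_columns sort_columns sort_columns_alt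
  have h := sortCols_loop [] old_list ([], false, 0) ([], [], [], false)
    (by simp [sortColsInv])
  simpa using h.1
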